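-- pv_equiv track=rewrite | github.com/suresh-vuppala/interview-ignite-lab | src/data/courses/dsa/two-pointers-sliding-window/sliding-window-variable-shortest/least-consecutive-cards-match/code/python/least_consecutive_cards_match.py | minimumCardPickupHashMap
-- ===== SOURCE A (Python) =====
-- def minimumCardPickupHashMap(cards):
--     last_seen = {}
--     min_len = float('inf')
--
--     for i, card in enumerate(cards):
--         # If card seen before, calculate distance
--         if card in last_seen:
--             distance = i - last_seen[card] + 1
--             min_len = min(min_len, distance)
--
--         # Update last seen position
--         last_seen[card] = i
--
--     return min_len if min_len != float('inf') else -1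
-- ===== SOURCE B (Python) =====
-- def minimumCardPickupHashMap(cards):
--     positions = {}
--     for i, c in enumerate(cards):
--         positions.setdefault(c, []).append(i)
--     best = -1
--     for idxs in positions.values():
--         for a, b in zip(idxs, idxs[1:]):
--             d = b - a + 1
--             if best == -1 or d < best:
--                 best = d
--     return best
-- ===== Notes on version B (the rewrite author's own statement) =====
-- stated objective: alternative
-- what changed: Replaces A's online last-seen tracking (running min updated while scanning) by a group-by pass that first builds value -> list of all indices, then takes the minimum consecutive gap within each group.
import Mathlib
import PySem

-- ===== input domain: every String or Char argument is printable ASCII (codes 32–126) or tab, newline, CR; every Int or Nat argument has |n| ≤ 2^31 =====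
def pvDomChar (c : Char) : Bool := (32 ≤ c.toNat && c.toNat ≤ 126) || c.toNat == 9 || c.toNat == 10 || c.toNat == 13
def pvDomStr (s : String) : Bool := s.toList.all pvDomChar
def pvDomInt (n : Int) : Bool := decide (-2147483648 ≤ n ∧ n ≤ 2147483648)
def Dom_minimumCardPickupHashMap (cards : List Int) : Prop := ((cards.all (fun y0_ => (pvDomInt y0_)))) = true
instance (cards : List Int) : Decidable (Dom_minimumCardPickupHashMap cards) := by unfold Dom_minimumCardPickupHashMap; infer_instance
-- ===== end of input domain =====

-- B replaces A's single-pass last-seen scan by a group-by pass (value -> list of all its indices)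
-- followed by a minimum over consecutive index gaps within each group (objective: alternative).

-- ===== PORT A =====
-- one loop step of A: (last_seen, min_len) updated at (i, card); min_len = none plays float('inf')
def pvStepA (st : PySem.Dict Int Int × Option Int) (p : Int × Int) : PySem.Dict Int Int × Option Int :=
  let m' := match st.1.get? p.2 with
    | some j => some (match st.2 with
        | none => p.1 - j + 1
        | some v => min v (p.1 - j + 1))
    | none => st.2
  (st.1.insert p.2 p.1, m')

def minimumCardPickupHashMap (cards : List Int) : Int :=
  let st := (PySem.List.enumerate cards).foldl pvStepA (PySem.Dict.empty, (none : Option Int))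
  match st.2 with
  | none => -1
  | some v => v

-- ===== PORT B =====
-- first pass of B: positions.setdefault(c, []).append(i)
def pvStepB (d : PySem.Dict Int (List Int)) (p : Int × Int) : PySem.Dict Int (List Int) :=
  d.modify p.2 [] (fun l => l ++ [p.1])

-- second pass of B, inner loop over one group's consecutive index pairs zip(idxs, idxs[1:])
def pvInnerB (best : Int) (idxs : List Int) : Int :=
  (idxs.zip (PySem.List.slice idxs (some 1) none)).foldl
    (fun best pr =>
      let d := pr.2 - pr.1 + 1
      if best == -1 || d < best then d else best)
    best

def minimumCardPickupHashMap_alt (cards : List Int) : Int :=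
  let positions := (PySem.List.enumerate cards).foldl pvStepB PySem.Dict.empty
  positions.values.foldl pvInnerB (-1)

-- ===== PRECONDITION & SPEC =====
def Spec_minimumCardPickupHashMap (cards : List Int) (out : Int) : Prop := out = minimumCardPickupHashMap_alt cards
instance (cards : List Int) (out : Int) : Decidable (Spec_minimumCardPickupHashMap cards out) := by unfold Spec_minimumCardPickupHashMap; infer_instance

-- ===== CLAIM (what is proved, stated in full; the proofs are below) =====
def Claim_equal_minimumCardPickupHashMap : Prop := ∀ (cards : List Int), Dom_minimumCardPickupHashMap cards → Spec_minimumCardPickupHashMap cards (minimumCardPickupHashMap cards)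

-- ===== LEMMAS AND PROOFS =====

-- proof-side vocabulary: the indices of card c, the consecutive gaps of an index list,
-- the distinct cards in first-occurrence order, and the per-group gap pool
def pvOcc (xs : List (Int × Int)) (c : Int) : List Int := (xs.filter (fun p => p.2 == c)).map (·.1)
def pvGaps (l : List Int) : List Int := (l.zip l.tail).map (fun p => p.2 - p.1 + 1)
def pvKeys (xs : List (Int × Int)) : List Int := PySem.Set.ofList (xs.map (·.2))
def pvG (xs : List (Int × Int)) : List Int := (pvKeys xs).flatMap (fun k => pvGaps (pvOcc xs k))
-- the two running-minimum combinators (A over Option Int, none = inf; B with sentinel -1)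
def pvOpA (m : Option Int) (d : Int) : Option Int :=
  some (match m with | none => d | some v => min v d)
def pvOpB (b d : Int) : Int := if b == -1 || d < b then d else b
-- A's stream of gaps, scanning with last-seen function f
def pvS (f : Int → Option Int) : List (Int × Int) → List Int
  | [] => []
  | p :: xs => (match f p.2 with | some j => [p.1 - j + 1] | none => []) ++
      pvS (fun c => if c = p.2 then some p.1 else f c) xs
-- the last-seen function after scanning xs on top of f
def pvUpd (f : Int → Option Int) (xs : List (Int × Int)) : Int → Option Int :=
  fun c => match (pvOcc xs c).getLast? with | some j => some j | none => f c

theorem pvA_decomp (xs : List (Int × Int)) (d : PySem.Dict Int Int) (m : Option Int) :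
    (xs.foldl pvStepA (d, m)).2 = (pvS (fun c => d.get? c) xs).foldl pvOpA m := by
  induction xs generalizing d m with
  | nil => simp [pvS]
  | cons p xs ih =>
    have hf : (fun c => (d.insert p.2 p.1).get? c)
        = (fun c => if c = p.2 then some p.1 else d.get? c) := by
      funext c; simp [PySem.Dict.get?_insert]
    cases h : d.get? p.2 with
    | none =>
      simp only [List.foldl_cons, pvS, pvStepA, h]
      rw [ih, hf]
      simp
    | some j =>
      simp only [List.foldl_cons, pvS, pvStepA, h]
      rw [ih, hf]
      simp [pvOpA]

theorem pvOcc_append (xs ys : List (Int × Int)) (c : Int) :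
    pvOcc (xs ++ ys) c = pvOcc xs c ++ pvOcc ys c := by
  simp [pvOcc]

theorem pvOcc_ne_nil_iff (xs : List (Int × Int)) (c : Int) :
    c ∈ xs.map (·.2) ↔ pvOcc xs c ≠ [] := by
  simp [pvOcc, List.filter_eq_nil_iff]

theorem pvUpd_cons (f : Int → Option Int) (p : Int × Int) (xs : List (Int × Int)) :
    pvUpd (fun c => if c = p.2 then some p.1 else f c) xs = pvUpd f (p :: xs) := by
  funext c
  simp only [pvUpd, pvOcc, List.filter_cons]
  by_cases hc : p.2 = c
  · simp only [hc, beq_self_eq_true, if_pos]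
    cases h : ((xs.filter (fun p => p.2 == c)).map (·.1)).getLast? with
    | none => simp [List.getLast?_cons, List.getLast?_eq_none_iff.mp h]
    | some j => simp [List.getLast?_cons, h]
  · have hb : (p.2 == c) = false := by simp [hc]
    simp only [hb, Bool.false_eq_true, if_false]
    cases h : ((xs.filter (fun p => p.2 == c)).map (·.1)).getLast? with
    | none => rw [if_neg (fun hcc => hc hcc.symm)]
    | some j => simp

theorem pvS_append_singleton (xs : List (Int × Int)) (f : Int → Option Int) (q : Int × Int) :
    pvS f (xs ++ [q]) = pvS f xs ++
      (match pvUpd f xs q.2 with | some j => [q.1 - j + 1] | none => []) := by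
  induction xs generalizing f with
  | nil => simp [pvS, pvUpd, pvOcc]
  | cons p xs ih =>
    simp only [List.cons_append, pvS, List.append_assoc]
    rw [ih, pvUpd_cons]

theorem pvGaps_append_singleton (l : List Int) (i : Int) :
    pvGaps (l ++ [i]) = pvGaps l ++
      (match l.getLast? with | some j => [i - j + 1] | none => []) := by
  induction l with
  | nil => simp [pvGaps]
  | cons a l ih =>
    cases l with
    | nil => simp [pvGaps]
    | cons b t =>
      simp only [pvGaps, List.cons_append, List.tail_cons, List.zip_cons_cons, List.map_cons] at *
      rw [ih]
      simp

-- the multiset of gaps A scans is the multiset of per-group consecutive gaps B scans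
theorem pvPerm (xs : List (Int × Int)) : (pvS (fun _ => none) xs).Perm (pvG xs) := by
  induction xs using List.reverseRecOn with
  | nil => simp [pvS, pvG, pvKeys]
  | append_singleton xs q ih =>
    rw [pvS_append_singleton]
    have hocc : ∀ k, pvOcc (xs ++ [q]) k = pvOcc xs k ++ (if q.2 == k then [q.1] else []) := by
      intro k
      rw [pvOcc_append]
      cases hqk : q.2 == k <;> simp [pvOcc, hqk]
    have hkeys : pvKeys (xs ++ [q]) = PySem.Set.add (pvKeys xs) q.2 := by
      simp [pvKeys, PySem.Set.ofList_append_singleton]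
    by_cases hc : q.2 ∈ pvKeys xs
    · have hmem : q.2 ∈ xs.map (·.2) := by
        simpa [pvKeys, PySem.Set.mem_ofList] using hc
      have hne : pvOcc xs q.2 ≠ [] := (pvOcc_ne_nil_iff xs q.2).mp hmem
      obtain ⟨j, hj⟩ : ∃ j, (pvOcc xs q.2).getLast? = some j := by
        cases h : (pvOcc xs q.2).getLast? with
        | none => exact absurd (List.getLast?_eq_none_iff.mp h) hne
        | some j => exact ⟨j, rfl⟩
      have hupd : pvUpd (fun _ => none) xs q.2 = some j := by simp [pvUpd, hj]
      rw [hupd]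
      obtain ⟨K₁, K₂, hK⟩ := List.append_of_mem hc
      have hnd : (pvKeys xs).Nodup := PySem.Set.nodup_ofList _
      rw [hK] at hnd
      simp only [List.nodup_append] at hnd
      have hc1 : q.2 ∉ K₁ := fun h => hnd.2.2 _ h _ List.mem_cons_self rfl
      have hc2 : q.2 ∉ K₂ := (List.nodup_cons.mp hnd.2.1).1
      have e1 : List.flatMap (fun k => pvGaps (pvOcc (xs ++ [q]) k)) K₁ =
          List.flatMap (fun k => pvGaps (pvOcc xs k)) K₁ := by
        refine List.flatMap_congr (fun k hk => ?_)
        have hqk : (q.2 == k) = false := by simp; rintro rfl; exact hc1 hk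
        rw [hocc k, hqk]; simp
      have e2 : List.flatMap (fun k => pvGaps (pvOcc (xs ++ [q]) k)) K₂ =
          List.flatMap (fun k => pvGaps (pvOcc xs k)) K₂ := by
        refine List.flatMap_congr (fun k hk => ?_)
        have hqk : (q.2 == k) = false := by simp; rintro rfl; exact hc2 hk
        rw [hocc k, hqk]; simp
      have e3 : pvGaps (pvOcc (xs ++ [q]) q.2) = pvGaps (pvOcc xs q.2) ++ [q.1 - j + 1] := by
        rw [hocc q.2]
        simp only [beq_self_eq_true, if_pos]
        rw [pvGaps_append_singleton, hj]
      have hG' : pvG (xs ++ [q]) =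
          List.flatMap (fun k => pvGaps (pvOcc xs k)) K₁ ++
          ((pvGaps (pvOcc xs q.2) ++ [q.1 - j + 1]) ++
           List.flatMap (fun k => pvGaps (pvOcc xs k)) K₂) := by
        rw [pvG, hkeys, PySem.Set.add_of_mem hc, hK, List.flatMap_append, List.flatMap_cons,
          e1, e2, e3]
      have hG : pvG xs =
          List.flatMap (fun k => pvGaps (pvOcc xs k)) K₁ ++
          (pvGaps (pvOcc xs q.2) ++
           List.flatMap (fun k => pvGaps (pvOcc xs k)) K₂) := by
        rw [pvG, hK, List.flatMap_append, List.flatMap_cons]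
      rw [hG']
      refine (ih.append_right [q.1 - j + 1]).trans ?_
      rw [hG]
      simp only [List.append_assoc]
      refine List.Perm.append_left _ ?_
      refine List.Perm.append_left _ ?_
      simp
    · have hmem : q.2 ∉ xs.map (·.2) := by
        simpa [pvKeys, PySem.Set.mem_ofList] using hc
      have hnil : pvOcc xs q.2 = [] := by
        by_contra h; exact hmem ((pvOcc_ne_nil_iff xs q.2).mpr h)
      have hupd : pvUpd (fun _ => none) xs q.2 = none := by simp [pvUpd, hnil]
      rw [hupd]
      have hG' : pvG (xs ++ [q]) = pvG xs := by
        rw [pvG, hkeys, PySem.Set.add_of_not_mem hc, List.flatMap_append]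
        have h2 : List.flatMap (fun k => pvGaps (pvOcc (xs ++ [q]) k)) [q.2] = [] := by
          simp only [List.flatMap_cons, List.flatMap_nil, List.append_nil]
          rw [hocc q.2, hnil]
          simp [pvGaps]
        rw [h2, List.append_nil, pvG]
        refine List.flatMap_congr (fun k hk => ?_)
        have hqk : (q.2 == k) = false := by simp; rintro rfl; exact hc hk
        rw [hocc k, hqk]; simp
      rw [hG']
      simpa using ih

theorem pvZip_lt (l : List Int) (h : l.Pairwise (· < ·)) :
    ∀ pr ∈ l.zip l.tail, pr.1 < pr.2 := by
  induction l with
  | nil => simp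
  | cons a l ih =>
    cases l with
    | nil => simp
    | cons b t =>
      intro pr hpr
      simp only [List.tail_cons, List.zip_cons_cons, List.mem_cons] at hpr
      rcases hpr with rfl | hpr
      · exact (List.pairwise_cons.mp h).1 b List.mem_cons_self
      · exact ih (List.pairwise_cons.mp h).2 pr hpr

theorem pvPos (cards : List Int) :
    ∀ g ∈ pvG (PySem.List.enumerate cards), 0 < g := by
  intro g hg
  simp only [pvG, List.mem_flatMap] at hg
  obtain ⟨k, _, hk⟩ := hg
  simp only [pvGaps, List.mem_map] at hk
  obtain ⟨pr, hpr, rfl⟩ := hk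
  have hpw : (pvOcc (PySem.List.enumerate cards) k).Pairwise (· < ·) := by
    unfold pvOcc
    rw [List.pairwise_map]
    exact (PySem.List.pairwise_lt_enumerate (xs := cards) (s := 0)).filter _
  have := pvZip_lt _ hpw pr hpr
  omega

theorem pvSentinel_aux (L : List Int) (hL : ∀ g ∈ L, 0 < g) (b : Int) (m : Option Int)
    (h : (b = -1 ∧ m = none) ∨ (∃ v, m = some v ∧ b = v ∧ 0 < v)) :
    (L.foldl pvOpB b = -1 ∧ L.foldl pvOpA m = none) ∨
      (∃ v, L.foldl pvOpA m = some v ∧ L.foldl pvOpB b = v ∧ 0 < v) := by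
  induction L generalizing b m with
  | nil => simpa using h
  | cons g L ih =>
    have hg : 0 < g := hL g List.mem_cons_self
    have hL' : ∀ x ∈ L, 0 < x := fun x hx => hL x (List.mem_cons_of_mem _ hx)
    simp only [List.foldl_cons]
    rcases h with ⟨rfl, rfl⟩ | ⟨v, rfl, rfl, hv⟩
    · refine ih hL' _ _ (Or.inr ⟨g, ?_, ?_, hg⟩)
      · simp [pvOpA]
      · simp [pvOpB]
    · refine ih hL' _ _ (Or.inr ⟨min b g, ?_, ?_, by omega⟩)
      · simp [pvOpA]
      · have hne : (b == -1) = false := by simp; omega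
        simp only [pvOpB, hne, Bool.false_or]
        by_cases hlt : g < b <;> simp [hlt] <;> omega

-- on a pool of positive gaps, B's -1-sentinel minimum equals A's Option-minimum
theorem pvSentinel (L : List Int) (hL : ∀ g ∈ L, 0 < g) :
    L.foldl pvOpB (-1) = match L.foldl pvOpA none with | none => -1 | some v => v := by
  rcases pvSentinel_aux L hL (-1) none (Or.inl ⟨rfl, rfl⟩) with ⟨h1, h2⟩ | ⟨v, h1, h2, _⟩ <;>
    rw [h1, h2]

theorem pvB_decomp (cards : List Int) :
    minimumCardPickupHashMap_alt cards =
      (pvG (PySem.List.enumerate cards)).foldl pvOpB (-1) := by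
  show ((PySem.List.enumerate cards).foldl pvStepB PySem.Dict.empty).values.foldl pvInnerB (-1) = _
  set E := PySem.List.enumerate cards with hE
  have hstep : pvStepB = fun (d : PySem.Dict Int (List Int)) (x : Int × Int) =>
      d.modify ((fun p : Int × Int => p.2) x) []
        ((fun (_ : PySem.Dict Int (List Int)) (x : Int × Int) => (fun l => l ++ [x.1])) d x) := rfl
  have hnd : (E.foldl pvStepB PySem.Dict.empty).keys.Nodup := by
    rw [hstep]
    exact PySem.Dict.nodup_keys_foldl_modify_key E (fun p => p.2) [] _ _ PySem.Dict.nodup_keys_empty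
  have hkeys : (E.foldl pvStepB PySem.Dict.empty).keys = pvKeys E := by
    rw [hstep, PySem.Dict.keys_foldl_modify_key]
    simp [pvKeys, PySem.Dict.keys_empty, PySem.Set.update_nil_left]
  have hgetD : ∀ k, (E.foldl pvStepB PySem.Dict.empty).getD k [] = pvOcc E k := by
    intro k
    have hfold : E.foldl pvStepB PySem.Dict.empty
        = (E.map (fun p => (p.2, p.1))).foldl
            (fun d p => d.modify p.1 [] (fun l => l ++ [p.2])) PySem.Dict.empty := by
      rw [List.foldl_map]; rfl
    rw [hfold, PySem.Dict.getD_foldl_modify_append]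
    simp [pvOcc, List.filter_map, Function.comp_def]
  have hvals : (E.foldl pvStepB PySem.Dict.empty).values
      = (pvKeys E).map (fun k => pvOcc E k) := by
    rw [PySem.Dict.values_eq_map_keys _ hnd [], hkeys]
    exact List.map_congr_left (fun k _ => hgetD k)
  rw [hvals]
  have hinner : ∀ (b : Int) (idxs : List Int), pvInnerB b idxs = (pvGaps idxs).foldl pvOpB b := by
    intro b idxs
    unfold pvInnerB pvGaps
    rw [List.foldl_map]
    have : PySem.List.slice idxs (some 1) none = idxs.tail := by
      simp [pysem]
    rw [this]
    rfl
  calc ((pvKeys E).map (fun k => pvOcc E k)).foldl pvInnerB (-1)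
      = (pvKeys E).foldl (fun b k => (pvGaps (pvOcc E k)).foldl pvOpB b) (-1) := by
        rw [List.foldl_map]
        exact List.foldl_ext _ _ _ (fun b k _ => hinner b (pvOcc E k))
    _ = (pvG E).foldl pvOpB (-1) := by
        rw [pvG, List.flatMap, List.foldl_flatten, List.foldl_map]

theorem pvOpA_rcomm : ∀ (b : Option Int) (a a' : Int),
    pvOpA (pvOpA b a) a' = pvOpA (pvOpA b a') a := by
  intro b a a'
  cases b <;> simp [pvOpA] <;> omega

-- ===== VERDICT (by name: the statement is the Claim_ definition above) =====
theorem minimumCardPickupHashMap_spec : Claim_equal_minimumCardPickupHashMap := by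
  intro cards _
  unfold Spec_minimumCardPickupHashMap
  have hA : minimumCardPickupHashMap cards =
      match (pvS (fun _ => none) (PySem.List.enumerate cards)).foldl pvOpA none with
      | none => -1 | some v => v := by
    show (match ((PySem.List.enumerate cards).foldl pvStepA
        (PySem.Dict.empty, (none : Option Int))).2 with
      | none => (-1 : Int) | some v => v) = _
    rw [pvA_decomp]
    have he : (fun c => (PySem.Dict.empty : PySem.Dict Int Int).get? c)
        = (fun _ => (none : Option Int)) := by
      funext c; simp [pysem]
    rw [he]
  letI : RightCommutative pvOpA := ⟨pvOpA_rcomm⟩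
  rw [hA, pvB_decomp, pvSentinel _ (pvPos cards), (pvPerm (PySem.List.enumerate cards)).foldl_eq]
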